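-- pv_equiv track=rewrite | github.com/Alif108/Artificial-Intelligence | Adversarial Search/Gomoku/gomoku.py | evaluate_heuristic
-- ===== SOURCE A (Python) =====
-- BOARD_SIZE = 3
--
-- def evaluate_heuristic(board, player):
--     """
--     this heuristic sees how many lines of length 5 the player has
--     """
--     score = 0
--     for r in range(BOARD_SIZE):
--         for c in range(BOARD_SIZE):
--             if board[r][c] == player:
--                 for dr, dc in [(1, 0), (0, 1), (1, 1), (-1, 1)]:
--                     count = 0
--                     row, col = r, c
--                     while 0 <= row < BOARD_SIZE and 0 <= col < BOARD_SIZE and board[row][col] == player: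
--                         count += 1
--                         row, col = row + dr, col + dc
--                     score += count
--     return score
-- ===== SOURCE B (Python) =====
-- BOARD_SIZE = 3
--
-- def evaluate_heuristic(board, player):
--     """
--     Same score via one running-counter sweep per line (rows, columns,
--     diagonals, anti-diagonals) instead of re-scanning forward from every cell.
--     """
--     n = BOARD_SIZE
--     lines = []
--     for r in range(n):
--         lines.append([board[r][c] for c in range(n)])
--     for c in range(n):
--         lines.append([board[r][c] for r in range(n)])
--     for d in range(-(n - 1), n):
--         lines.append([board[r][r - d] for r in range(n) if 0 <= r - d < n])
--     for s in range(2 * n - 1):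
--         lines.append([board[r][s - r] for r in range(n - 1, -1, -1) if 0 <= s - r < n])
--     score = 0
--     for line in lines:
--         count = 0
--         for v in line:
--             count = count + 1 if v == player else 0
--             score += count
--     return score
-- ===== Notes on version B (the rewrite author's own statement) =====
-- stated objective: alternative
-- what changed: Instead of re-scanning forward from every player cell in all four directions, B enumerates the board's 20 lines (rows, columns, diagonals, anti-diagonals) once and sweeps each with a running counter, adding the counter at each cell; a maximal run of length L contributes L(L+1)/2 either way.
-- outside the precondition, e.g. on evaluate_heuristic([[1, 0], [0, 1]], 1): A raises IndexError, B raises IndexError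
import Mathlib
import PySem

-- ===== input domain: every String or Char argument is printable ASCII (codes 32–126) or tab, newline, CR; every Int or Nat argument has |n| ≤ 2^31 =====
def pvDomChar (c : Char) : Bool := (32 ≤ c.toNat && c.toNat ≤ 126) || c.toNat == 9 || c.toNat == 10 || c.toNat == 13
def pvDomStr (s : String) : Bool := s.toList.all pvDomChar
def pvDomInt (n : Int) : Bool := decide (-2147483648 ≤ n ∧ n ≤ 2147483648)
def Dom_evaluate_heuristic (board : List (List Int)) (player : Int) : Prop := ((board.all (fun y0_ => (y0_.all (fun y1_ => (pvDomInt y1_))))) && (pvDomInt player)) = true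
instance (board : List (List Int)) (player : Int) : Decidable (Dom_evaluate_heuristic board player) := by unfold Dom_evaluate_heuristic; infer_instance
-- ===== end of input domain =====

-- B replaces A's forward re-scan from every player cell by one running-counter
-- sweep along each of the board's 20 lines (rows, columns, diagonals,
-- anti-diagonals); objective: alternative single-pass-per-line decomposition.

-- ===== PORT A =====
-- board[row][col]: under Pre_ every access is in range, so the default is never used
def pvCellA (board : List (List Int)) (r c : Int) : Int :=
  PySem.List.pyGetD (PySem.List.pyGetD board r []) c 0

-- the while loop: fuel 3 suffices (within bounds some coordinate strictly increases,
-- so the guard fails after at most 3 iterations and the fuel-0 return equals the loop exit)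
def pvRunA (board : List (List Int)) (player dr dc : Int) :
    Nat → Int → Int → Int → Int
  | 0, _, _, count => count
  | fuel + 1, row, col, count =>
    if 0 ≤ row ∧ row < 3 ∧ 0 ≤ col ∧ col < 3 ∧ pvCellA board row col = player then
      pvRunA board player dr dc fuel (row + dr) (col + dc) (count + 1)
    else count

def evaluate_heuristic (board : List (List Int)) (player : Int) : Int :=
  (PySem.List.pyRange 0 3 1).foldl (fun score r =>
    (PySem.List.pyRange 0 3 1).foldl (fun score c =>
      if pvCellA board r c = player then
        ([((1 : Int), (0 : Int)), (0, 1), (1, 1), (-1, 1)]).foldl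
          (fun score d => score + pvRunA board player d.1 d.2 3 r c 0) score
      else score) score) 0

-- ===== PORT B =====
def pvCellB (board : List (List Int)) (r c : Int) : Int :=
  PySem.List.pyGetD (PySem.List.pyGetD board r []) c 0

-- the 20 lines of the board, each listed in sweep order (Source B's `lines`)
def pvLines (board : List (List Int)) : List (List Int) :=
  ((PySem.List.pyRange 0 3 1).map (fun r =>
      (PySem.List.pyRange 0 3 1).map (fun c => pvCellB board r c)))
  ++ ((PySem.List.pyRange 0 3 1).map (fun c =>
      (PySem.List.pyRange 0 3 1).map (fun r => pvCellB board r c)))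
  ++ ((PySem.List.pyRange (-2) 3 1).map (fun d =>
      ((PySem.List.pyRange 0 3 1).filter (fun r => decide (0 ≤ r - d ∧ r - d < 3))).map
        (fun r => pvCellB board r (r - d))))
  ++ ((PySem.List.pyRange 0 5 1).map (fun s =>
      ((PySem.List.pyRange 2 (-1) (-1)).filter (fun r => decide (0 ≤ s - r ∧ s - r < 3))).map
        (fun r => pvCellB board r (s - r))))

-- one step of the running counter: state (count, score)
def pvStep (player : Int) (st : Int × Int) (v : Int) : Int × Int :=
  let cnt : Int := if v = player then st.1 + 1 else 0
  (cnt, st.2 + cnt)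

def evaluate_heuristic_alt (board : List (List Int)) (player : Int) : Int :=
  (pvLines board).foldl (fun score line => (line.foldl (pvStep player) (0, score)).2) 0

-- ===== PRECONDITION & SPEC =====
-- Pre_ excludes exactly the boards on which Python A raises IndexError:
-- fewer than BOARD_SIZE rows, or one of the first BOARD_SIZE rows shorter than BOARD_SIZE.
def Pre_evaluate_heuristic (board : List (List Int)) (player : Int) : Prop :=
  3 ≤ board.length ∧ ∀ row ∈ board.take 3, 3 ≤ row.length
instance (board : List (List Int)) (player : Int) : Decidable (Pre_evaluate_heuristic board player) := by
  unfold Pre_evaluate_heuristic; infer_instance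

def pvWitness_evaluate_heuristic : List (List Int) × Int :=
  ([[1, 0, 0], [0, 1, 0], [1, 1, 1]], 1)

def Spec_evaluate_heuristic (board : List (List Int)) (player : Int) (out : Int) : Prop := out = evaluate_heuristic_alt board player
instance (board : List (List Int)) (player : Int) (out : Int) : Decidable (Spec_evaluate_heuristic board player out) := by unfold Spec_evaluate_heuristic; infer_instance

-- ===== CLAIM (what is proved, stated in full; the proofs are below) =====
def Claim_equal_evaluate_heuristic : Prop := ∀ (board : List (List Int)) (player : Int), Dom_evaluate_heuristic board player → Pre_evaluate_heuristic board player → Spec_evaluate_heuristic board player (evaluate_heuristic board player)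

-- ===== LEMMAS AND PROOFS =====

-- Both sides depend on the board only through the nine booleans
-- "cell (r,c) equals player"; we abstract each port over q : Int → Int → Bool
-- and finish by deciding the resulting 9-boolean identity.

def qRun (q : Int → Int → Bool) (dr dc : Int) : Nat → Int → Int → Int → Int
  | 0, _, _, count => count
  | fuel + 1, row, col, count =>
    if 0 ≤ row ∧ row < 3 ∧ 0 ≤ col ∧ col < 3 ∧ q row col = true then
      qRun q dr dc fuel (row + dr) (col + dc) (count + 1)
    else count

def qA (q : Int → Int → Bool) : Int :=
  (PySem.List.pyRange 0 3 1).foldl (fun score r =>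
    (PySem.List.pyRange 0 3 1).foldl (fun score c =>
      if q r c = true then
        ([((1 : Int), (0 : Int)), (0, 1), (1, 1), (-1, 1)]).foldl
          (fun score d => score + qRun q d.1 d.2 3 r c 0) score
      else score) score) 0

def qStep (st : Int × Int) (v : Bool) : Int × Int :=
  let cnt : Int := if v then st.1 + 1 else 0
  (cnt, st.2 + cnt)

def qLines (q : Int → Int → Bool) : List (List Bool) :=
  ((PySem.List.pyRange 0 3 1).map (fun r =>
      (PySem.List.pyRange 0 3 1).map (fun c => q r c)))
  ++ ((PySem.List.pyRange 0 3 1).map (fun c =>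
      (PySem.List.pyRange 0 3 1).map (fun r => q r c)))
  ++ ((PySem.List.pyRange (-2) 3 1).map (fun d =>
      ((PySem.List.pyRange 0 3 1).filter (fun r => decide (0 ≤ r - d ∧ r - d < 3))).map
        (fun r => q r (r - d))))
  ++ ((PySem.List.pyRange 0 5 1).map (fun s =>
      ((PySem.List.pyRange 2 (-1) (-1)).filter (fun r => decide (0 ≤ s - r ∧ s - r < 3))).map
        (fun r => q r (s - r))))

def qB (q : Int → Int → Bool) : Int :=
  (qLines q).foldl (fun score line => (line.foldl qStep (0, score)).2) 0

def mkq (a b c d e f g h i : Bool) : Int → Int → Bool := fun r col =>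
  if r = 0 then (if col = 0 then a else if col = 1 then b else if col = 2 then c else false)
  else if r = 1 then (if col = 0 then d else if col = 1 then e else if col = 2 then f else false)
  else if r = 2 then (if col = 0 then g else if col = 1 then h else if col = 2 then i else false)
  else false

-- A's port equals its abstraction
lemma runA_eq (board : List (List Int)) (player dr dc : Int) :
    ∀ (fuel : Nat) (row col count : Int),
      pvRunA board player dr dc fuel row col count =
        qRun (fun r c => decide (pvCellA board r c = player)) dr dc fuel row col count := by
  intro fuel
  induction fuel with
  | zero => intro _ _ _; rfl
  | succ n ih =>
    intro row col count
    simp only [pvRunA, qRun, decide_eq_true_eq]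
    split_ifs
    · exact ih _ _ _
    · rfl

lemma A_eq (board : List (List Int)) (player : Int) :
    evaluate_heuristic board player =
      qA (fun r c => decide (pvCellA board r c = player)) := by
  simp only [evaluate_heuristic, qA, decide_eq_true_eq, runA_eq]

-- B's port equals its abstraction
lemma step_eq (player : Int) (st : Int × Int) (v : Int) :
    pvStep player st v = qStep st (decide (v = player)) := by
  simp [pvStep, qStep]

lemma sweep_eq (player : Int) :
    ∀ (line : List Int) (st : Int × Int),
      line.foldl (pvStep player) st =
        (line.map (fun v => decide (v = player))).foldl qStep st := by
  intro line
  induction line with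
  | nil => intro _; rfl
  | cons x xs ih => intro st; simp only [List.foldl, List.map, step_eq]; exact ih _


-- the line lists, evaluated (kernel-checked: the index ranges and filters are closed)
lemma qLines_explicit (q : Int → Int → Bool) :
    qLines q =
      [[q 0 0, q 0 1, q 0 2], [q 1 0, q 1 1, q 1 2], [q 2 0, q 2 1, q 2 2],
       [q 0 0, q 1 0, q 2 0], [q 0 1, q 1 1, q 2 1], [q 0 2, q 1 2, q 2 2],
       [q 0 2], [q 0 1, q 1 2], [q 0 0, q 1 1, q 2 2], [q 1 0, q 2 1], [q 2 0],
       [q 0 0], [q 1 0, q 0 1], [q 2 0, q 1 1, q 0 2], [q 2 1, q 1 2], [q 2 2]] := rfl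

lemma pvLines_explicit (board : List (List Int)) :
    pvLines board =
      [[pvCellB board 0 0, pvCellB board 0 1, pvCellB board 0 2],
       [pvCellB board 1 0, pvCellB board 1 1, pvCellB board 1 2],
       [pvCellB board 2 0, pvCellB board 2 1, pvCellB board 2 2],
       [pvCellB board 0 0, pvCellB board 1 0, pvCellB board 2 0],
       [pvCellB board 0 1, pvCellB board 1 1, pvCellB board 2 1],
       [pvCellB board 0 2, pvCellB board 1 2, pvCellB board 2 2],
       [pvCellB board 0 2], [pvCellB board 0 1, pvCellB board 1 2],
       [pvCellB board 0 0, pvCellB board 1 1, pvCellB board 2 2],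
       [pvCellB board 1 0, pvCellB board 2 1], [pvCellB board 2 0],
       [pvCellB board 0 0], [pvCellB board 1 0, pvCellB board 0 1],
       [pvCellB board 2 0, pvCellB board 1 1, pvCellB board 0 2],
       [pvCellB board 2 1, pvCellB board 1 2], [pvCellB board 2 2]] := rfl

lemma qLines_map (board : List (List Int)) (player : Int) :
    qLines (fun r c => decide (pvCellB board r c = player)) =
      (pvLines board).map (List.map (fun v => decide (v = player))) := by
  rw [qLines_explicit, pvLines_explicit]
  simp only [List.map]

lemma B_eq (board : List (List Int)) (player : Int) :
    evaluate_heuristic_alt board player =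
      qB (fun r c => decide (pvCellB board r c = player)) := by
  unfold evaluate_heuristic_alt qB
  rw [qLines_map, List.foldl_map]
  have h : (fun (score : Int) (line : List Int) =>
        ((line.map (fun v => decide (v = player))).foldl qStep (0, score)).2) =
      (fun (score : Int) (line : List Int) => (line.foldl (pvStep player) (0, score)).2) := by
    funext score line
    rw [sweep_eq]
  rw [h]

-- the abstractions only look at q inside the board
lemma qRun_congr (q q' : Int → Int → Bool) (dr dc : Int)
    (h : ∀ r c, 0 ≤ r → r < 3 → 0 ≤ c → c < 3 → q r c = q' r c) :
    ∀ (fuel : Nat) (row col count : Int),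
      qRun q dr dc fuel row col count = qRun q' dr dc fuel row col count := by
  intro fuel
  induction fuel with
  | zero => intro _ _ _; rfl
  | succ n ih =>
    intro row col count
    simp only [qRun]
    by_cases hb : 0 ≤ row ∧ row < 3 ∧ 0 ≤ col ∧ col < 3
    · rw [h row col hb.1 hb.2.1 hb.2.2.1 hb.2.2.2]
      split_ifs
      · exact ih _ _ _
      · rfl
    · rw [if_neg (by tauto), if_neg (by tauto)]

lemma qA_congr (q q' : Int → Int → Bool)
    (h : ∀ r c, 0 ≤ r → r < 3 → 0 ≤ c → c < 3 → q r c = q' r c) :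
    qA q = qA q' := by
  have h00 := h 0 0 (by norm_num) (by norm_num) (by norm_num) (by norm_num)
  have h01 := h 0 1 (by norm_num) (by norm_num) (by norm_num) (by norm_num)
  have h02 := h 0 2 (by norm_num) (by norm_num) (by norm_num) (by norm_num)
  have h10 := h 1 0 (by norm_num) (by norm_num) (by norm_num) (by norm_num)
  have h11 := h 1 1 (by norm_num) (by norm_num) (by norm_num) (by norm_num)
  have h12 := h 1 2 (by norm_num) (by norm_num) (by norm_num) (by norm_num)
  have h20 := h 2 0 (by norm_num) (by norm_num) (by norm_num) (by norm_num)
  have h21 := h 2 1 (by norm_num) (by norm_num) (by norm_num) (by norm_num)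
  have h22 := h 2 2 (by norm_num) (by norm_num) (by norm_num) (by norm_num)
  show qA q = qA q'
  simp only [qA, show PySem.List.pyRange 0 3 1 = [0, 1, 2] from rfl, List.foldl,
    qRun_congr q q' 1 0 h, qRun_congr q q' 0 1 h, qRun_congr q q' 1 1 h,
    qRun_congr q q' (-1) 1 h, h00, h01, h02, h10, h11, h12, h20, h21, h22]

lemma qLines_congr (q q' : Int → Int → Bool)
    (h : ∀ r c, 0 ≤ r → r < 3 → 0 ≤ c → c < 3 → q r c = q' r c) :
    qLines q = qLines q' := by
  have h00 := h 0 0 (by norm_num) (by norm_num) (by norm_num) (by norm_num)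
  have h01 := h 0 1 (by norm_num) (by norm_num) (by norm_num) (by norm_num)
  have h02 := h 0 2 (by norm_num) (by norm_num) (by norm_num) (by norm_num)
  have h10 := h 1 0 (by norm_num) (by norm_num) (by norm_num) (by norm_num)
  have h11 := h 1 1 (by norm_num) (by norm_num) (by norm_num) (by norm_num)
  have h12 := h 1 2 (by norm_num) (by norm_num) (by norm_num) (by norm_num)
  have h20 := h 2 0 (by norm_num) (by norm_num) (by norm_num) (by norm_num)
  have h21 := h 2 1 (by norm_num) (by norm_num) (by norm_num) (by norm_num)
  have h22 := h 2 2 (by norm_num) (by norm_num) (by norm_num) (by norm_num)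
  rw [qLines_explicit, qLines_explicit]
  simp only [h00, h01, h02, h10, h11, h12, h20, h21, h22]

lemma qB_congr (q q' : Int → Int → Bool)
    (h : ∀ r c, 0 ≤ r → r < 3 → 0 ≤ c → c < 3 → q r c = q' r c) :
    qB q = qB q' := by
  unfold qB
  rw [qLines_congr q q' h]

-- the 9-boolean identity behind the equivalence, checked by the kernel
lemma core_eq : ∀ (a b c d e f g h i : Bool),
    qA (mkq a b c d e f g h i) = qB (mkq a b c d e f g h i) := by decide

-- ===== VERDICT (by name: the statement is the Claim_ definition above) =====
theorem evaluate_heuristic_spec : Claim_equal_evaluate_heuristic := by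
  intro board player _ _
  unfold Spec_evaluate_heuristic
  rw [A_eq, B_eq]
  have hcb : pvCellB = pvCellA := rfl
  rw [hcb]
  set q : Int → Int → Bool := fun r c => decide (pvCellA board r c = player) with hq
  have h : ∀ r c, 0 ≤ r → r < 3 → 0 ≤ c → c < 3 →
      q r c = mkq (q 0 0) (q 0 1) (q 0 2) (q 1 0) (q 1 1) (q 1 2) (q 2 0) (q 2 1) (q 2 2) r c := by
    intro r c h1 h2 h3 h4
    interval_cases r <;> interval_cases c <;> rfl
  rw [qA_congr _ _ h, qB_congr _ _ h]
  exact core_eq _ _ _ _ _ _ _ _ _
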